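-- pv_equiv track=rewrite | github.com/hasahmed/tweetgen | general_util.py | polish_tail
-- ===== SOURCE A (Python) =====
-- def polish_tail(finished_tweet, trumps_words):
--     acceptable_finish = {".", "!"}
--
--     # trim words off the end util hitting a real one
--     # note... add a check to see if the word is a stop_word as well
--     words = finished_tweet.split()
--     for i, word in reversed(list(enumerate(words))):
--         if word in trumps_words:
--             tmp_tweet = ''
--             for j in range(0, i + 1):
--                 tmp_tweet += words[j] + " "
--             finished_tweet = tmp_tweet
--             break
--
--     finished_tweet = finished_tweet.strip()
--     #need to check to see if -1 is out of range of string
--     if len(finished_tweet) > 1: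
--         last_char = finished_tweet[-1]
--         if last_char not in acceptable_finish:
--             finished_tweet += "!"
--     return finished_tweet
-- ===== SOURCE B (Python) =====
-- def polish_tail(finished_tweet, trumps_words):
--     words = finished_tweet.split()
--     # last index whose word is a known word, found in one forward comprehension
--     idxs = [i for i, w in enumerate(words) if w in trumps_words]
--     if idxs:
--         finished_tweet = " ".join(words[:idxs[-1] + 1])
--     finished_tweet = finished_tweet.strip()
--     if len(finished_tweet) > 1 and finished_tweet[-1] not in {".", "!"}:
--         finished_tweet += "!"
--     return finished_tweet
-- ===== Notes on version B (the rewrite author's own statement) =====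
-- stated objective: simpler
-- what changed: Replaces the backward scan with break plus a character-by-character rebuilding loop by a single forward comprehension collecting matching indices and one ' '.join over the prefix slice.
import Mathlib
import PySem

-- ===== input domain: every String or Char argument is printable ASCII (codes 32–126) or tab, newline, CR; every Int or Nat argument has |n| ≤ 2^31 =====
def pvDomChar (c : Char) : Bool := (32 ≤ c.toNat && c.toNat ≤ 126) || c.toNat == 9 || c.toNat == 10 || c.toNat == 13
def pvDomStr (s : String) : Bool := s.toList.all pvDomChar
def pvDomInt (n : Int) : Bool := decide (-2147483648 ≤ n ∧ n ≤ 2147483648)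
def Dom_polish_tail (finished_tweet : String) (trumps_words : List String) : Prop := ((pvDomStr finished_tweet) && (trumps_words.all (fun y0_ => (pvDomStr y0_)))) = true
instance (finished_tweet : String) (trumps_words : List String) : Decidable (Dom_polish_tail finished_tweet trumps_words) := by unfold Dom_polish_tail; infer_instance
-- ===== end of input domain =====

-- B replaces A's backward scan-with-break and character-rebuilding inner loop by a forward
-- comprehension of matching indices plus one ' '.join over a prefix slice (objective: simpler).

-- ===== PORT A =====
-- inner loop: tmp_tweet = ''; for j in range(0, i + 1): tmp_tweet += words[j] + " "
def ptA_build (words : List String) (i : Int) : String :=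
  (PySem.List.pyRange 0 (i + 1)).foldl (fun tmp j => tmp ++ PySem.List.pyGetD words j "" ++ " ") ""

-- for i, word in reversed(list(enumerate(words))): if word in trumps_words: … break
def ptA_scan (words trumps_words : List String) (ft : String) : List (Int × String) → String
  | [] => ft
  | (i, word) :: rest =>
      if word ∈ trumps_words then ptA_build words i
      else ptA_scan words trumps_words ft rest

def polish_tail (finished_tweet : String) (trumps_words : List String) : String :=
  let acceptable_finish := PySem.Set.ofList [".", "!"]
  let words := PySem.Str.split₀ finished_tweet
  let ft1 := ptA_scan words trumps_words finished_tweet (PySem.List.enumerate words).reverse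
  let ft2 := PySem.Str.strip ft1
  if 1 < PySem.Str.len ft2 then
    -- finished_tweet[-1]: in range because len > 1, so the getD default is never used
    let last_char := ((PySem.Str.pyGet? ft2 (-1)).map (fun c => String.ofList [c])).getD ""
    if ¬ (last_char ∈ acceptable_finish) then ft2 ++ "!" else ft2
  else ft2

-- ===== PORT B =====
def polish_tail_alt (finished_tweet : String) (trumps_words : List String) : String :=
  let words := PySem.Str.split₀ finished_tweet
  -- idxs = [i for i, w in enumerate(words) if w in trumps_words]
  let idxs := (PySem.List.enumerate words).filterMap
      (fun p => if p.2 ∈ trumps_words then some p.1 else none)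
  let ft1 := match idxs.getLast? with
    | some i => PySem.Str.join " " (PySem.List.slice words none (some (i + 1)))
    | none => finished_tweet
  let ft2 := PySem.Str.strip ft1
  if 1 < PySem.Str.len ft2 ∧
      ¬ (((PySem.Str.pyGet? ft2 (-1)).map (fun c => String.ofList [c])).getD "" ∈ PySem.Set.ofList [".", "!"]) then
    ft2 ++ "!"
  else ft2

-- ===== PRECONDITION & SPEC =====
def Spec_polish_tail (finished_tweet : String) (trumps_words : List String) (out : String) : Prop := out = polish_tail_alt finished_tweet trumps_words
instance (finished_tweet : String) (trumps_words : List String) (out : String) : Decidable (Spec_polish_tail finished_tweet trumps_words out) := by unfold Spec_polish_tail; infer_instance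

-- ===== CLAIM (what is proved, stated in full; the proofs are below) =====
def Claim_equal_polish_tail : Prop := ∀ (finished_tweet : String) (trumps_words : List String), Dom_polish_tail finished_tweet trumps_words → Spec_polish_tail finished_tweet trumps_words (polish_tail finished_tweet trumps_words)

-- ===== LEMMAS AND PROOFS =====

-- the common tail (strip already applied): len > 1 guard plus '!' append
def pvTail (s : String) : String :=
  if 1 < PySem.Str.len s then
    if ¬ (((PySem.Str.pyGet? s (-1)).map (fun c => String.ofList [c])).getD "" ∈ PySem.Set.ofList [".", "!"]) then s ++ "!" else s
  else s

theorem pvTail_alt (s : String) :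
    (if 1 < PySem.Str.len s ∧
        ¬ (((PySem.Str.pyGet? s (-1)).map (fun c => String.ofList [c])).getD "" ∈ PySem.Set.ofList [".", "!"]) then
      s ++ "!" else s) = pvTail s := by
  unfold pvTail
  split_ifs with h1 h2 h3 <;> first | rfl | (exfalso; tauto)

def pvCat (l : List (List Char)) : List Char :=
  l.foldl (fun a w => a ++ w ++ [' ']) []

theorem pvCat_acc (l : List (List Char)) (a : List Char) :
    l.foldl (fun a w => a ++ w ++ [' ']) a = a ++ pvCat l := by
  induction l generalizing a with
  | nil => simp [pvCat]
  | cons w l ih => simp [pvCat, List.foldl_cons, ih (a ++ w ++ [' ']), ih (w ++ [' '])]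

theorem pvCat_join (l : List (List Char)) (h : l ≠ []) :
    pvCat l = PySem.Chars.join [' '] l ++ [' '] := by
  induction l with
  | nil => simp at h
  | cons w l ih =>
    cases l with
    | nil => simp [pvCat, PySem.Chars.join_singleton]
    | cons q rest =>
      have : pvCat (w :: q :: rest) = (w ++ [' ']) ++ pvCat (q :: rest) := by
        simp [pvCat, List.foldl_cons, pvCat_acc]
      rw [this, ih (by simp), PySem.Chars.join_cons_cons]
      simp

theorem isspace_space : PySem.Chars.isspace ' ' = true := by decide

theorem strip_append_space (x : List Char) :
    PySem.Chars.strip (x ++ [' ']) = PySem.Chars.strip x := by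
  unfold PySem.Chars.strip PySem.Chars.lstrip PySem.Chars.rstrip
  rw [List.dropWhile_append]
  by_cases h : (List.dropWhile PySem.Chars.isspace x).isEmpty = true
  · simp [List.isEmpty_iff.mp h, isspace_space]
  · rw [if_neg h, List.reverse_append]
    simp [isspace_space]

theorem strS_eq (a b : String) (h : PySem.Chars.strip a.toList = PySem.Chars.strip b.toList) :
    PySem.Str.strip a = PySem.Str.strip b := by
  unfold PySem.Str.strip; rw [h]

theorem foldS_toList (l : List String) (a : String) :
    (l.foldl (fun a w => a ++ w ++ " ") a).toList
      = (l.map String.toList).foldl (fun a w => a ++ w ++ [' ']) a.toList := by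
  induction l generalizing a with
  | nil => simp
  | cons w l ih => simp [List.foldl_cons, ih]

theorem range_getD_eq_take (ws : List String) (n : Nat) (h : n ≤ ws.length) :
    (List.range n).map (fun j => ws.getD j "") = ws.take n := by
  apply List.ext_getElem
  · simp [h]
  · intro i h1 h2
    simp only [List.getElem_map, List.getElem_range, List.getElem_take]
    rw [List.getD_eq_getElem]

theorem build_toList (ws : List String) (k : Nat) (hk : k < ws.length) :
    (ptA_build ws (k : Int)).toList = pvCat ((ws.take (k + 1)).map String.toList) := by
  unfold ptA_build
  have hcast : (k : Int) + 1 = ((k + 1 : Nat) : Int) := by push_cast; ring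
  rw [hcast, PySem.List.pyRange_zero_natCast, List.foldl_map]
  simp only [PySem.List.pyGetD_natCast]
  have : (List.range (k + 1)).foldl (fun tmp j => tmp ++ ws.getD j "" ++ " ") ""
      = ((List.range (k + 1)).map (fun j => ws.getD j "")).foldl (fun tmp w => tmp ++ w ++ " ") "" := by
    rw [List.foldl_map]
  rw [this, range_getD_eq_take ws (k + 1) (by omega), foldS_toList]
  rfl

theorem scan_find (words trumps_words : List String) (ft : String) (l : List (Int × String)) :
    ptA_scan words trumps_words ft l
      = match l.find? (fun p => decide (p.2 ∈ trumps_words)) with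
        | some p => ptA_build words p.1
        | none => ft := by
  induction l with
  | nil => rfl
  | cons p rest ih =>
    obtain ⟨i, w⟩ := p
    by_cases h : w ∈ trumps_words <;>
      simp [ptA_scan, List.find?_cons, h, ih]

theorem head?_filterMap (trumps_words : List String) (m : List (Int × String)) :
    (m.filterMap (fun p => if p.2 ∈ trumps_words then some p.1 else none)).head?
      = (m.find? (fun p => decide (p.2 ∈ trumps_words))).map (·.1) := by
  induction m with
  | nil => rfl
  | cons p rest ih =>
    by_cases h : p.2 ∈ trumps_words <;>
      simp [List.filterMap_cons, List.find?_cons, h, ih]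

theorem getLast?_idxs (trumps_words : List String) (l : List (Int × String)) :
    (l.filterMap (fun p => if p.2 ∈ trumps_words then some p.1 else none)).getLast?
      = (l.reverse.find? (fun p => decide (p.2 ∈ trumps_words))).map (·.1) := by
  rw [List.getLast?_eq_head?_reverse, ← List.filterMap_reverse, head?_filterMap]

theorem strip_scan_eq (words trumps_words : List String) (ft : String) :
    PySem.Str.strip (ptA_scan words trumps_words ft (PySem.List.enumerate words).reverse)
      = PySem.Str.strip
          (match ((PySem.List.enumerate words).filterMap
              (fun p => if p.2 ∈ trumps_words then some p.1 else none)).getLast? with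
            | some i => PySem.Str.join " " (PySem.List.slice words none (some (i + 1)))
            | none => ft) := by
  rw [scan_find, getLast?_idxs]
  cases hf : (PySem.List.enumerate words).reverse.find? (fun p => decide (p.2 ∈ trumps_words)) with
  | none => simp
  | some p =>
    simp only [Option.map_some]
    have hmem : p ∈ PySem.List.enumerate words 0 := by
      have := List.mem_of_find?_eq_some hf
      simpa using this
    obtain ⟨k, hk, hp⟩ := (PySem.List.mem_enumerate_iff words 0 p).mp hmem
    have hp1 : p.1 = (k : Int) := by rw [hp]; simp
    rw [hp1]
    -- B side: slice = take (k+1)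
    have hslice : PySem.List.slice words none (some ((k : Int) + 1)) = words.take (k + 1) := by
      rw [PySem.List.slice_to words (by omega)]
      congr 1
    rw [hslice]
    -- reduce to Chars level
    apply strS_eq
    rw [build_toList words k hk, PySem.Str.toList_join,
      pvCat_join _ (by
        have hw : words ≠ [] := by intro h; rw [h] at hk; simp at hk
        simp [List.take_eq_nil_iff, hw])]
    rw [strip_append_space]
    rfl

theorem main_eq (finished_tweet : String) (trumps_words : List String) :
    polish_tail finished_tweet trumps_words = polish_tail_alt finished_tweet trumps_words := by
  unfold polish_tail polish_tail_alt
  rw [pvTail_alt]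
  show pvTail _ = pvTail _
  exact congrArg pvTail (strip_scan_eq _ _ _)

-- ===== VERDICT (by name: the statement is the Claim_ definition above) =====
theorem polish_tail_spec : Claim_equal_polish_tail := by
  intro ft tw _
  unfold Spec_polish_tail
  exact main_eq ft tw
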